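-- pv_equiv track=rewrite | github.com/lvngstn/chord-check | main.py | generate_possible_chords_with_n_notes
-- ===== SOURCE A (Python) =====
-- from itertools import product
--
-- def generate_possible_chords_with_n_notes(n_strings, stretch, max_fret, shapes_only, open_chords):
--     valid_combinations = []
--
--     for pos in product(range(max_fret + 1), repeat=n_strings):
--         non_zero_numbers = []
--         if open_chords:
--             non_zero_numbers = [num for num in pos if num != 0]
--         else:
--             non_zero_numbers = pos
--
--         if non_zero_numbers:
--             max_pos, min_pos = max(non_zero_numbers), min(non_zero_numbers)
--             if max_pos - min_pos > stretch:
--                 continue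
--             if shapes_only and 0 not in pos:
--                 continue
--             if shapes_only and min_pos > stretch:
--                 continue
--             if n_strings == 5 and 0 not in pos and pos.count(min_pos) < 2:
--                 continue
--             if n_strings == 6 and 0 not in pos and pos.count(min_pos) < 3:
--                 continue
--             if n_strings == 6 and pos.count(0) < 2:
--                 continue
--             valid_combinations.append(pos)
--
--     return valid_combinations
-- ===== SOURCE B (Python) =====
-- def generate_possible_chords_with_n_notes(n_strings, stretch, max_fret, shapes_only, open_chords):
--     # Depth-first builder over an explicit stack, pruning any prefix whose
--     # relevant placed frets already span more than `stretch`.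
--     out = []
--
--     def leaf_ok(pos):
--         rel = [v for v in pos if v != 0] if open_chords else pos
--         if not rel:
--             return False
--         hi, lo = max(rel), min(rel)
--         if hi - lo > stretch:
--             return False
--         if shapes_only and 0 not in pos:
--             return False
--         if shapes_only and lo > stretch:
--             return False
--         if n_strings == 5 and 0 not in pos and pos.count(lo) < 2:
--             return False
--         if n_strings == 6 and 0 not in pos and pos.count(lo) < 3:
--             return False
--         if n_strings == 6 and pos.count(0) < 2:
--             return False
--         return True
--
--     stack = [[]]
--     while stack:
--         pfx = stack.pop()
--         if len(pfx) == n_strings: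
--             if leaf_ok(pfx):
--                 out.append(tuple(pfx))
--             continue
--         rel = [v for v in pfx if v != 0] if open_chords else pfx
--         if rel and max(rel) - min(rel) > stretch:
--             continue
--         for f in range(max_fret, -1, -1):  # pushed descending, so popped ascending
--             stack.append(pfx + [f])
--     return out
-- ===== Notes on version B (the rewrite author's own statement) =====
-- stated objective: alternative
-- what changed: Replaces the exhaustive itertools.product enumeration with an explicit-stack depth-first builder that prunes any prefix whose relevant placed frets already span more than `stretch`, emitting the surviving leaves in the same lexicographic order.
import Mathlib
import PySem

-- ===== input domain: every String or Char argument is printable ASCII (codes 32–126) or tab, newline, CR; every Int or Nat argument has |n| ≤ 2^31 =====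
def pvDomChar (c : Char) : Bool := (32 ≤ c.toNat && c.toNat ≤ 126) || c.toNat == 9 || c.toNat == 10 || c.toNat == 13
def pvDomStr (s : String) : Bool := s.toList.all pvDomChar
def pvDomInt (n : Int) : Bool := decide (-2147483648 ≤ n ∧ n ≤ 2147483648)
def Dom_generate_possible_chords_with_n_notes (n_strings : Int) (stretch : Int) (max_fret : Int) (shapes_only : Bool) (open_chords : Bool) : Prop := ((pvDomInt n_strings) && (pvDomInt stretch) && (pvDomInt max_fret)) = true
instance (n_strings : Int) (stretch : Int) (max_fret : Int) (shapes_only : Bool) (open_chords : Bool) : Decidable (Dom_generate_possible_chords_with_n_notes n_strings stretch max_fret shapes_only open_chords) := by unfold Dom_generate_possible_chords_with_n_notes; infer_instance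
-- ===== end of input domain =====

-- B replaces A's exhaustive itertools.product enumeration by an explicit-stack
-- depth-first builder that prunes a prefix as soon as the relevant placed frets
-- already span more than `stretch` (objective: alternative; same list, same order).

-- ===== PORT A =====
-- itertools.product(range(max_fret+1), repeat=n_strings), in Python's lexicographic order
def pvProdRep (xs : List Int) : Nat → List (List Int)
  | 0 => [[]]
  | k + 1 => xs.flatMap (fun x => (pvProdRep xs k).map (fun t => x :: t))

def generate_possible_chords_with_n_notes (n_strings : Int) (stretch : Int) (max_fret : Int) (shapes_only : Bool) (open_chords : Bool) : List (List Int) :=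
  (pvProdRep (PySem.List.pyRange 0 (max_fret + 1) 1) n_strings.toNat).foldl
    (fun valid_combinations pos =>
      let non_zero_numbers := if open_chords then pos.filter (fun num => num != 0) else pos;
      match PySem.List.max? non_zero_numbers (fun y => y),
            PySem.List.min? non_zero_numbers (fun y => y) with
      | some max_pos, some min_pos =>
        if max_pos - min_pos > stretch then valid_combinations
        else if shapes_only && !(pos.contains 0) then valid_combinations
        else if shapes_only && min_pos > stretch then valid_combinations
        else if n_strings == 5 && !(pos.contains 0) && pos.count min_pos < 2 then valid_combinations
        else if n_strings == 6 && !(pos.contains 0) && pos.count min_pos < 3 then valid_combinations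
        else if n_strings == 6 && pos.count 0 < 2 then valid_combinations
        else valid_combinations ++ [pos]
      | _, _ => valid_combinations)   -- 'if non_zero_numbers:' is false: nothing appended
    []

-- ===== PORT B =====
def bRel (open_chords : Bool) (l : List Int) : List Int :=
  if open_chords then l.filter (fun v => v != 0) else l

def bLeafOk (n_strings stretch : Int) (shapes_only open_chords : Bool) (pos : List Int) : Bool :=
  let rel := bRel open_chords pos
  match PySem.List.max? rel (fun y => y) with
  | none => false
  | some hi =>
    match PySem.List.min? rel (fun y => y) with
    | none => false
    | some lo =>
    if hi - lo > stretch then false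
    else if shapes_only && !(pos.contains 0) then false
    else if shapes_only && lo > stretch then false
    else if n_strings == 5 && !(pos.contains 0) && pos.count lo < 2 then false
    else if n_strings == 6 && !(pos.contains 0) && pos.count lo < 3 then false
    else if n_strings == 6 && pos.count 0 < 2 then false
    else true

-- prune a pfx whose relevant placed frets already span more than `stretch`
def bPrune (stretch : Int) (open_chords : Bool) (pfx : List Int) : Bool :=
  let rel := bRel open_chords pfx
  match PySem.List.max? rel (fun y => y) with
  | none => false
  | some hi =>
    match PySem.List.min? rel (fun y => y) with
    | none => false
    | some lo => hi - lo > stretch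

-- strict decrease of the stack weight when a node is expanded (bLoop termination)
theorem weight_lt (c k : Nat) : c * (c + 1) ^ k < (c + 1) ^ (k + 1) := by
  have hp : 0 < (c + 1) ^ k := Nat.pow_pos (Nat.succ_pos c)
  calc c * (c + 1) ^ k < (c + 1) * (c + 1) ^ k :=
        Nat.mul_lt_mul_of_lt_of_le (Nat.lt_succ_self c) (Nat.le_refl _) hp
    _ = (c + 1) ^ (k + 1) := (pow_succ' (c + 1) k).symm

-- Python B's `while stack:` loop; the Python pops from the end of its stack and
-- pushes children in descending fret order, which this head-of-list stack mirrors
-- exactly (children appear at the top in ascending fret order).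
def bLoop (n_strings stretch max_fret : Int) (shapes_only open_chords : Bool) :
    List (Nat × List Int) → List (List Int) → List (List Int)
  | [], out => out
  | (0, pfx) :: rest, out =>
      bLoop n_strings stretch max_fret shapes_only open_chords rest
        (if bLeafOk n_strings stretch shapes_only open_chords pfx then out ++ [pfx] else out)
  | (k + 1, pfx) :: rest, out =>
      if bPrune stretch open_chords pfx then
        bLoop n_strings stretch max_fret shapes_only open_chords rest out
      else
        bLoop n_strings stretch max_fret shapes_only open_chords
          (((PySem.List.pyRange 0 (max_fret + 1) 1).map (fun f => (k, pfx ++ [f]))) ++ rest) out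
termination_by stack _ => (stack.map (fun e => ((max_fret + 1).toNat + 1) ^ e.1)).sum
decreasing_by
  · simp
  · simp only [List.map_cons, List.sum_cons]
    have : 0 < ((max_fret + 1).toNat + 1) ^ (k + 1) := Nat.pow_pos (Nat.succ_pos _)
    simp only [Nat.succ_eq_add_one]
    omega
  · simp only [List.map_append, List.map_cons, List.sum_append, List.sum_cons, List.map_map,
      Function.comp_def]
    rw [List.map_const', List.sum_replicate, smul_eq_mul, PySem.List.length_pyRange_one]
    simp only [Int.sub_zero]
    have := weight_lt (max_fret + 1).toNat k
    simp only [Nat.succ_eq_add_one]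
    omega

def generate_possible_chords_with_n_notes_alt (n_strings : Int) (stretch : Int) (max_fret : Int) (shapes_only : Bool) (open_chords : Bool) : List (List Int) :=
  bLoop n_strings stretch max_fret shapes_only open_chords [(n_strings.toNat, [])] []

-- ===== PRECONDITION & SPEC =====
-- Pre_ excludes n_strings < 0, where Python A raises ValueError (negative 'repeat').
def Pre_generate_possible_chords_with_n_notes (n_strings : Int) (stretch : Int) (max_fret : Int) (shapes_only : Bool) (open_chords : Bool) : Prop := 0 ≤ n_strings
instance (n_strings : Int) (stretch : Int) (max_fret : Int) (shapes_only : Bool) (open_chords : Bool) : Decidable (Pre_generate_possible_chords_with_n_notes n_strings stretch max_fret shapes_only open_chords) := by unfold Pre_generate_possible_chords_with_n_notes; infer_instance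

def pvWitness_generate_possible_chords_with_n_notes : Int × Int × Int × Bool × Bool := (2, 1, 2, false, false)

def Spec_generate_possible_chords_with_n_notes (n_strings : Int) (stretch : Int) (max_fret : Int) (shapes_only : Bool) (open_chords : Bool) (out : List (List Int)) : Prop := out = generate_possible_chords_with_n_notes_alt n_strings stretch max_fret shapes_only open_chords
instance (n_strings : Int) (stretch : Int) (max_fret : Int) (shapes_only : Bool) (open_chords : Bool) (out : List (List Int)) : Decidable (Spec_generate_possible_chords_with_n_notes n_strings stretch max_fret shapes_only open_chords out) := by unfold Spec_generate_possible_chords_with_n_notes; infer_instance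

-- ===== CLAIM (what is proved, stated in full; the proofs are below) =====
def Claim_equal_generate_possible_chords_with_n_notes : Prop := ∀ (n_strings : Int) (stretch : Int) (max_fret : Int) (shapes_only : Bool) (open_chords : Bool), Dom_generate_possible_chords_with_n_notes n_strings stretch max_fret shapes_only open_chords → Pre_generate_possible_chords_with_n_notes n_strings stretch max_fret shapes_only open_chords → Spec_generate_possible_chords_with_n_notes n_strings stretch max_fret shapes_only open_chords (generate_possible_chords_with_n_notes n_strings stretch max_fret shapes_only open_chords)

-- ===== LEMMAS AND PROOFS =====

-- A's loop body is 'append pos iff bLeafOk pos'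
theorem step_match (n_strings stretch : Int) (shapes_only : Bool)
    (acc : List (List Int)) (pos : List Int) (o1 o2 : Option Int) :
    (match o1, o2 with
      | some max_pos, some min_pos =>
        if max_pos - min_pos > stretch then acc
        else if shapes_only && !(pos.contains 0) then acc
        else if shapes_only && min_pos > stretch then acc
        else if n_strings == 5 && !(pos.contains 0) && pos.count min_pos < 2 then acc
        else if n_strings == 6 && !(pos.contains 0) && pos.count min_pos < 3 then acc
        else if n_strings == 6 && pos.count 0 < 2 then acc
        else acc ++ [pos]
      | _, _ => acc)
    = (if (match o1 with
        | none => false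
        | some hi =>
          match o2 with
          | none => false
          | some lo =>
          if hi - lo > stretch then false
          else if shapes_only && !(pos.contains 0) then false
          else if shapes_only && lo > stretch then false
          else if n_strings == 5 && !(pos.contains 0) && pos.count lo < 2 then false
          else if n_strings == 6 && !(pos.contains 0) && pos.count lo < 3 then false
          else if n_strings == 6 && pos.count 0 < 2 then false
          else true) then acc ++ [pos] else acc) := by
  cases o1 <;> cases o2 <;> dsimp only <;> split_ifs <;> simp_all

theorem aStep_eq (n_strings stretch : Int) (shapes_only open_chords : Bool)
    (acc : List (List Int)) (pos : List Int) :
    (let non_zero_numbers := if open_chords then pos.filter (fun num => num != 0) else pos;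
      match PySem.List.max? non_zero_numbers (fun y => y),
            PySem.List.min? non_zero_numbers (fun y => y) with
      | some max_pos, some min_pos =>
        if max_pos - min_pos > stretch then acc
        else if shapes_only && !(pos.contains 0) then acc
        else if shapes_only && min_pos > stretch then acc
        else if n_strings == 5 && !(pos.contains 0) && pos.count min_pos < 2 then acc
        else if n_strings == 6 && !(pos.contains 0) && pos.count min_pos < 3 then acc
        else if n_strings == 6 && pos.count 0 < 2 then acc
        else acc ++ [pos]
      | _, _ => acc)
    = (if bLeafOk n_strings stretch shapes_only open_chords pos then acc ++ [pos] else acc) := by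
  show _ = _
  simp only [bLeafOk, bRel]
  exact step_match n_strings stretch shapes_only acc pos _ _

theorem bRel_append (open_chords : Bool) (l₁ l₂ : List Int) :
    bRel open_chords (l₁ ++ l₂) = bRel open_chords l₁ ++ bRel open_chords l₂ := by
  unfold bRel; split <;> simp

-- pruning is sound: a pruned pfx has no valid completion
theorem prune_sound (n_strings stretch : Int) (shapes_only open_chords : Bool)
    (pfx t : List Int) (h : bPrune stretch open_chords pfx = true) :
    bLeafOk n_strings stretch shapes_only open_chords (pfx ++ t) = false := by
  unfold bPrune at h
  unfold bLeafOk
  simp only [bRel_append]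
  cases hm : PySem.List.max? (bRel open_chords pfx) (fun y => y) with
  | none => simp [hm] at h
  | some hi =>
    cases hn : PySem.List.min? (bRel open_chords pfx) (fun y => y) with
    | none => simp [hm, hn] at h
    | some lo =>
      simp only [hm, hn, decide_eq_true_eq] at h
      have hne : bRel open_chords pfx ++ bRel open_chords t ≠ [] := by
        intro hc
        have : bRel open_chords pfx = [] := by
          cases (List.append_eq_nil_iff.mp hc); assumption
        rw [this] at hm
        simp [PySem.List.max?] at hm
      cases hM : PySem.List.max? (bRel open_chords pfx ++ bRel open_chords t) (fun y => y) with
      | none => exact absurd ((PySem.List.max?_eq_none_iff _ _).mp hM) hne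
      | some HI =>
        cases hN : PySem.List.min? (bRel open_chords pfx ++ bRel open_chords t) (fun y => y) with
        | none => exact absurd ((PySem.List.min?_eq_none_iff _ _).mp hN) hne
        | some LO =>
          have hhi : hi ≤ HI := by
            have hmem : hi ∈ bRel open_chords pfx ++ bRel open_chords t :=
              List.mem_append_left _ (PySem.List.max?_mem hm)
            exact PySem.List.max?_isMax hM hi hmem
          have hlo : LO ≤ lo := by
            have hmem : lo ∈ bRel open_chords pfx ++ bRel open_chords t :=
              List.mem_append_left _ (PySem.List.min?_mem hn)
            exact PySem.List.min?_isMin hN lo hmem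
          have : HI - LO > stretch := by omega
          simp [this]

-- a filter passes through a flatMap
theorem filter_flatMap' {α β : Type} (l : List α) (g : α → List β) (p : β → Bool) :
    (l.flatMap g).filter p = l.flatMap (fun x => (g x).filter p) := by
  induction l with
  | nil => rfl
  | cons x xs ih => simp [List.flatMap_cons, List.filter_append, ih]

-- recursive presentation of the pruned DFS (proof-side helper for bLoop)
def bDfs (n_strings stretch max_fret : Int) (shapes_only open_chords : Bool) : Nat → List Int → List (List Int)
  | 0, pfx => if bLeafOk n_strings stretch shapes_only open_chords pfx then [pfx] else []
  | k + 1, pfx =>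
    if bPrune stretch open_chords pfx then []
    else (PySem.List.pyRange 0 (max_fret + 1) 1).flatMap
      (fun f => bDfs n_strings stretch max_fret shapes_only open_chords k (pfx ++ [f]))

-- the DFS builds exactly the filtered block of completions of its pfx
theorem bDfs_eq (n_strings stretch max_fret : Int) (shapes_only open_chords : Bool) :
    ∀ (k : Nat) (pfx : List Int),
    bDfs n_strings stretch max_fret shapes_only open_chords k pfx =
      ((pvProdRep (PySem.List.pyRange 0 (max_fret + 1) 1) k).map (fun t => pfx ++ t)).filter
        (bLeafOk n_strings stretch shapes_only open_chords) := by
  intro k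
  induction k with
  | zero =>
    intro pfx
    rw [bDfs]
    cases hb : bLeafOk n_strings stretch shapes_only open_chords pfx <;>
      simp [pvProdRep, hb, List.filter]
  | succ k ih =>
    intro pfx
    cases hp : bPrune stretch open_chords pfx with
    | true =>
      rw [bDfs, if_pos hp]
      symm
      rw [List.filter_eq_nil_iff]
      intro a ha
      obtain ⟨t, _, rfl⟩ := List.mem_map.mp ha
      simp [prune_sound n_strings stretch shapes_only open_chords pfx t hp]
    | false =>
      rw [bDfs, if_neg (by simp [hp])]
      simp only [pvProdRep, List.map_flatMap, filter_flatMap', List.map_map, ih,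
        Function.comp_def, List.append_assoc, List.singleton_append]

-- the stack loop is the concatenation of the DFS blocks of its stack entries
theorem bLoop_eq (n_strings stretch max_fret : Int) (shapes_only open_chords : Bool)
    (stack : List (Nat × List Int)) (out : List (List Int)) :
    bLoop n_strings stretch max_fret shapes_only open_chords stack out
      = out ++ stack.flatMap
          (fun e => bDfs n_strings stretch max_fret shapes_only open_chords e.1 e.2) := by
  induction stack, out using bLoop.induct n_strings stretch max_fret shapes_only open_chords with
  | case1 out => simp [bLoop]
  | case2 pfx rest out ih =>
    simp only [dite_eq_ite] at ih
    rw [bLoop, ih]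
    cases hb : bLeafOk n_strings stretch shapes_only open_chords pfx <;>
      simp [bDfs, hb]
  | case3 k pfx rest out h ih =>
    rw [bLoop, if_pos h, ih]
    have hz : bDfs n_strings stretch max_fret shapes_only open_chords (k + 1) pfx = [] := by
      rw [bDfs, if_pos h]
    simp [hz]
  | case4 k pfx rest out h ih =>
    rw [bLoop, if_neg h, ih]
    have hz : bDfs n_strings stretch max_fret shapes_only open_chords (k + 1) pfx
        = (PySem.List.pyRange 0 (max_fret + 1) 1).flatMap
            (fun f => bDfs n_strings stretch max_fret shapes_only open_chords k (pfx ++ [f])) := by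
      rw [bDfs, if_neg h]
    simp [hz, List.flatMap_append, List.flatMap_map]

-- ===== VERDICT (by name: the statement is the Claim_ definition above) =====
theorem generate_possible_chords_with_n_notes_spec : Claim_equal_generate_possible_chords_with_n_notes := by
  intro n_strings stretch max_fret shapes_only open_chords _ _
  unfold Spec_generate_possible_chords_with_n_notes
  unfold generate_possible_chords_with_n_notes generate_possible_chords_with_n_notes_alt
  have halt : bLoop n_strings stretch max_fret shapes_only open_chords [(n_strings.toNat, [])] []
      = bDfs n_strings stretch max_fret shapes_only open_chords n_strings.toNat [] := by
    rw [bLoop_eq]; simp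
  rw [halt, bDfs_eq]
  have hbody : (fun (acc : List (List Int)) (pos : List Int) =>
      let non_zero_numbers := if open_chords then pos.filter (fun num => num != 0) else pos;
      match PySem.List.max? non_zero_numbers (fun y => y),
            PySem.List.min? non_zero_numbers (fun y => y) with
      | some max_pos, some min_pos =>
        if max_pos - min_pos > stretch then acc
        else if shapes_only && !(pos.contains 0) then acc
        else if shapes_only && min_pos > stretch then acc
        else if n_strings == 5 && !(pos.contains 0) && pos.count min_pos < 2 then acc
        else if n_strings == 6 && !(pos.contains 0) && pos.count min_pos < 3 then acc
        else if n_strings == 6 && pos.count 0 < 2 then acc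
        else acc ++ [pos]
      | _, _ => acc)
      = (fun acc pos => if bLeafOk n_strings stretch shapes_only open_chords pos then acc ++ [pos] else acc) := by
    funext acc pos
    exact aStep_eq n_strings stretch shapes_only open_chords acc pos
  rw [hbody, PySem.List.foldl_append_if_eq_filter]
  simp
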